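-- pv_equiv track=rewrite | github.com/sethluby/msp-ansible-platform | scripts/yaml_indent_fix.py | fix_section_task_indentation
-- ===== SOURCE A (Python) =====
-- from typing import List, Tuple
--
-- SECTION_TASK_KEYS = {"pre_tasks", "tasks", "post_tasks"}
--
-- def fix_section_task_indentation(lines: List[str]) -> List[str]:
--     i = 0
--     out: List[str] = []
--     while i < len(lines):
--         line = lines[i]
--         stripped = line.strip()
--         if stripped.endswith(":"):
--             key = stripped[:-1].strip()
--             if key in SECTION_TASK_KEYS:
--                 out.append(line)
--                 base_indent = len(line) - len(line.lstrip())
--                 i += 1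
--                 while i < len(lines):
--                     nxt = lines[i]
--                     nstrip = nxt.strip()
--                     nindent = len(nxt) - len(nxt.lstrip())
--
--                     # stop when next section or less-indented mapping
--                     if nstrip.endswith(":") and nindent <= base_indent:
--                         break
--
--                     # Reindent task list items (`- name:` or `-` at this level)
--                     if nstrip.startswith("- name:") and nindent <= base_indent:
--                         out.append(" " * (base_indent + 2) + nstrip + "\n")
--                     else:
--                         out.append(nxt)
--                     i += 1
--                 continue
--
--         out.append(line)
--         i += 1
--     return out
-- ===== SOURCE B (Python) =====
-- SECTION_TASK_KEYS = {"pre_tasks", "tasks", "post_tasks"}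
--
-- def fix_section_task_indentation(lines):
--     out = []
--     base = None  # indentation of the current section key, or None when outside a section
--     for line in lines:
--         stripped = line.strip()
--         if base is not None:
--             nindent = len(line) - len(line.lstrip())
--             if not (stripped.endswith(":") and nindent <= base):
--                 if stripped.startswith("- name:") and nindent <= base:
--                     out.append(" " * (base + 2) + stripped + "\n")
--                 else:
--                     out.append(line)
--                 continue
--             base = None  # section ends here; handle this same line as a top-level line
--         out.append(line)
--         if stripped.endswith(":") and stripped[:-1].strip() in SECTION_TASK_KEYS:
--             base = len(line) - len(line.lstrip())
--     return out
-- ===== Notes on version B (the rewrite author's own statement) =====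
-- stated objective: simpler
-- what changed: Replaced A's index-driven outer/inner nested while loops (with a shared index and `continue` re-processing the break line) by a single flat for-loop over the lines carrying an Option base-indent state, handling the section-ending line in the same iteration.
import Mathlib
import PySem

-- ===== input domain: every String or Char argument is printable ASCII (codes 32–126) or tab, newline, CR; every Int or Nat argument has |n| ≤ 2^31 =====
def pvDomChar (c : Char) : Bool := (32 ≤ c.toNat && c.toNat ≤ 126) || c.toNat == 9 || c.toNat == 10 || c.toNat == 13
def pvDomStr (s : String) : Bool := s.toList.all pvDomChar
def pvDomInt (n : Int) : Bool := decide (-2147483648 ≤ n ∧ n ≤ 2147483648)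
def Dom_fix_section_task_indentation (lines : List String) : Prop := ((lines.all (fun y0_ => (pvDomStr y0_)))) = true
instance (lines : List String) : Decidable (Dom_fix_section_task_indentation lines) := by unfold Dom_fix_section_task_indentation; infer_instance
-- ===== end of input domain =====

-- B replaces A's nested while loops (with a shared index and `continue` re-processing
-- the break line) by a single flat fold over the lines with an Option base-indent
-- state; objective: simpler. Equal return value proved on all inputs.

-- len(line) - len(line.lstrip())
def pvIndent (line : String) : Int :=
  PySem.Str.len line - PySem.Str.len (PySem.Str.lstrip line)

-- ===== PORT A =====
-- inner `while i < len(lines): ...` over the lines not yet consumed; on break it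
-- returns the unconsumed remainder (the break line first) and the output so far
def pvInnerA (base_indent : Int) : List String → List String → List String × List String
  | [], out => ([], out)
  | nxt :: rest, out =>
    let nstrip := PySem.Str.strip nxt
    let nindent := pvIndent nxt
    if PySem.Str.endswith nstrip ":" && decide (nindent ≤ base_indent) then
      (nxt :: rest, out)
    else if PySem.Str.startswith nstrip "- name:" && decide (nindent ≤ base_indent) then
      pvInnerA base_indent rest
        (out ++ [String.ofList (List.replicate (base_indent + 2).toNat ' ') ++ nstrip ++ "\n"])
    else
      pvInnerA base_indent rest (out ++ [nxt])

-- outer `while i < len(lines): ...`; fuel (≥ number of remaining lines at every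
-- call, one unit per outer iteration) only makes the recursion structural
def pvOuterA : Nat → List String → List String → List String
  | 0, _, out => out
  | _ + 1, [], out => out
  | fuel + 1, line :: rest, out =>
    let stripped := PySem.Str.strip line
    if PySem.Str.endswith stripped ":" then
      let key := PySem.Str.strip (PySem.Str.slice stripped none (some (-1)))
      if ["pre_tasks", "tasks", "post_tasks"].contains key then
        let base_indent := pvIndent line
        let r := pvInnerA base_indent rest (out ++ [line])
        pvOuterA fuel r.1 r.2
      else
        pvOuterA fuel rest (out ++ [line])
    else
      pvOuterA fuel rest (out ++ [line])

def fix_section_task_indentation (lines : List String) : List String :=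
  pvOuterA lines.length lines []

-- ===== PORT B =====
-- one step of B's flat for-loop; state = (out, base : Option Int)
def pvStepB (st : List String × Option Int) (line : String) : List String × Option Int :=
  let out := st.1
  let stripped := PySem.Str.strip line
  -- the `continue`-free tail of the loop body: append the line, maybe open a section
  let handleTop : List String × Option Int :=
    (out ++ [line],
     if PySem.Str.endswith stripped ":" &&
        ["pre_tasks", "tasks", "post_tasks"].contains
          (PySem.Str.strip (PySem.Str.slice stripped none (some (-1)))) then
       some (pvIndent line)
     else none)
  match st.2 with
  | some b =>
      let nindent := pvIndent line
      if !(PySem.Str.endswith stripped ":" && decide (nindent ≤ b)) then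
        if PySem.Str.startswith stripped "- name:" && decide (nindent ≤ b) then
          (out ++ [String.ofList (List.replicate (b + 2).toNat ' ') ++ stripped ++ "\n"], some b)
        else (out ++ [line], some b)
      else handleTop
  | none => handleTop

def fix_section_task_indentation_alt (lines : List String) : List String :=
  (lines.foldl pvStepB ([], none)).1

-- ===== PRECONDITION & SPEC =====
def Spec_fix_section_task_indentation (lines : List String) (out : List String) : Prop := out = fix_section_task_indentation_alt lines
instance (lines : List String) (out : List String) : Decidable (Spec_fix_section_task_indentation lines out) := by unfold Spec_fix_section_task_indentation; infer_instance

-- ===== CLAIM (what is proved, stated in full; the proofs are below) =====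
def Claim_equal_fix_section_task_indentation : Prop := ∀ (lines : List String), Dom_fix_section_task_indentation lines → Spec_fix_section_task_indentation lines (fix_section_task_indentation lines)

-- ===== LEMMAS AND PROOFS =====

-- the inner loop only consumes lines: its returned remainder is no longer than its input
theorem pvInnerA_len (b : Int) (rest out : List String) :
    (pvInnerA b rest out).1.length ≤ rest.length := by
  induction rest generalizing out with
  | nil => simp [pvInnerA]
  | cons nxt rest ih =>
    rw [pvInnerA]
    split
    · simp
    · split
      · exact le_trans (ih _) (by simp)
      · exact le_trans (ih _) (by simp)

-- simultaneous invariant: A's outer loop on the remaining lines equals B's fold over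
-- them with no open section, and A's inner loop (followed by the outer loop on the
-- remainder it leaves) equals B's fold with the section state `some b`.
theorem pvQR (n : Nat) (rest : List String) (hn : rest.length = n) :
    (∀ fuel out, rest.length ≤ fuel →
      pvOuterA fuel rest out = (rest.foldl pvStepB (out, none)).1) ∧
    (∀ b out fuel, (pvInnerA b rest out).1.length ≤ fuel →
      pvOuterA fuel (pvInnerA b rest out).1 (pvInnerA b rest out).2 =
        (rest.foldl pvStepB (out, some b)).1) := by
  induction n using Nat.strong_induction_on generalizing rest with
  | _ n ih =>
    cases rest with
    | nil =>
      constructor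
      · intro fuel out _
        cases fuel <;> simp [pvOuterA]
      · intro b out fuel _
        cases fuel <;> simp [pvInnerA, pvOuterA]
    | cons line rest =>
      have hn' : rest.length + 1 = n := by simpa using hn
      have ih1 := ih rest.length (by omega) rest rfl
      have hQ : ∀ fuel out, (line :: rest).length ≤ fuel →
          pvOuterA fuel (line :: rest) out = ((line :: rest).foldl pvStepB (out, none)).1 := by
        intro fuel out hf
        cases fuel with
        | zero => simp at hf
        | succ fuel =>
          rw [pvOuterA]
          simp only [List.foldl_cons]
          by_cases he : PySem.Str.endswith (PySem.Str.strip line) ":" = true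
          · by_cases hk : (["pre_tasks", "tasks", "post_tasks"].contains
                (PySem.Str.strip (PySem.Str.slice (PySem.Str.strip line) none (some (-1))))) = true
            · simp only [he, hk, if_pos, pvStepB, Bool.and_self]
              exact ih1.2 (pvIndent line) (out ++ [line]) fuel
                (le_trans (pvInnerA_len _ _ _) (by simp at hf ⊢; omega))
            · simp only [he, hk, if_pos, if_neg, Bool.and_false, pvStepB,
                Bool.false_eq_true, not_false_eq_true]
              exact ih1.1 fuel (out ++ [line]) (by simp at hf ⊢; omega)
          · simp only [he, if_neg, pvStepB, Bool.false_and, Bool.false_eq_true,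
              not_false_eq_true]
            exact ih1.1 fuel (out ++ [line]) (by simp at hf ⊢; omega)
      refine ⟨hQ, ?_⟩
      intro b out fuel hf
      rw [pvInnerA] at hf ⊢
      by_cases hbrk : (PySem.Str.endswith (PySem.Str.strip line) ":" &&
          decide (pvIndent line ≤ b)) = true
      · -- break: A re-processes the break line in the outer loop; B handles it in this step
        simp only [hbrk, if_pos] at hf ⊢
        rw [hQ fuel out hf]
        simp only [List.foldl_cons, pvStepB, hbrk, Bool.not_true, Bool.false_eq_true, if_false]
      · simp only [hbrk, Bool.false_eq_true, not_false_eq_true, if_neg,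
          List.foldl_cons] at hf ⊢
        by_cases hnm : (PySem.Str.startswith (PySem.Str.strip line) "- name:" &&
            decide (pvIndent line ≤ b)) = true
        · simp only [hnm, if_pos] at hf ⊢
          have := ih1.2 b (out ++ [String.ofList (List.replicate (b + 2).toNat ' ') ++
            PySem.Str.strip line ++ "\n"]) fuel hf
          rw [this]
          simp only [pvStepB, hbrk, Bool.not_false, if_pos, hnm]
        · simp only [hnm, Bool.false_eq_true, if_false] at hf ⊢
          rw [ih1.2 b (out ++ [line]) fuel hf]
          simp only [pvStepB, hbrk, Bool.not_false, if_pos, hnm, Bool.false_eq_true, if_false]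

-- ===== VERDICT (by name: the statement is the Claim_ definition above) =====
theorem fix_section_task_indentation_spec : Claim_equal_fix_section_task_indentation := by
  intro lines _
  unfold Spec_fix_section_task_indentation fix_section_task_indentation
    fix_section_task_indentation_alt
  exact (pvQR lines.length lines rfl).1 lines.length [] le_rfl
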